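-- pv_equiv track=rewrite | github.com/adityakumar-09/Infosys-Springboard-Programming-Fundamentals-using-Python | Part 1/12.Exercise on String - Level 2-Ticket-Number.py | generate_ticket
-- ===== SOURCE A (Python) =====
-- def generate_ticket(airline,source,destination,no_of_passengers):
--     ticket_number_list=[]
--     src = source[:3].upper()
--     dest = destination[:3].upper()
--     for i in range(no_of_passengers):
--         ticket_number = f"{airline}:{src}:{dest}:{101+i}"
--         ticket_number_list.append(ticket_number)
--
--     #Use the below return statement wherever applicable
--     return ticket_number_list[-5:]  # Return the last 5 ticket numbers
-- ===== SOURCE B (Python) =====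
-- def generate_ticket(airline, source, destination, no_of_passengers):
--     # Walk DOWN from the last index collecting at most 5 tickets, then reverse:
--     # never materialises the full list of n tickets.
--     prefix = f"{airline}:{source[:3].upper()}:{destination[:3].upper()}:"
--     out = []
--     i = no_of_passengers - 1
--     while i >= 0 and len(out) < 5:
--         out.append(prefix + str(101 + i))
--         i -= 1
--     out.reverse()
--     return out
-- ===== Notes on version B (the rewrite author's own statement) =====
-- stated objective: faster
-- what changed: Instead of building all n ticket strings and slicing the last 5, B precomputes the common prefix once and walks DOWN from the last passenger index collecting at most 5 tickets, then reverses the short list.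
import Mathlib
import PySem

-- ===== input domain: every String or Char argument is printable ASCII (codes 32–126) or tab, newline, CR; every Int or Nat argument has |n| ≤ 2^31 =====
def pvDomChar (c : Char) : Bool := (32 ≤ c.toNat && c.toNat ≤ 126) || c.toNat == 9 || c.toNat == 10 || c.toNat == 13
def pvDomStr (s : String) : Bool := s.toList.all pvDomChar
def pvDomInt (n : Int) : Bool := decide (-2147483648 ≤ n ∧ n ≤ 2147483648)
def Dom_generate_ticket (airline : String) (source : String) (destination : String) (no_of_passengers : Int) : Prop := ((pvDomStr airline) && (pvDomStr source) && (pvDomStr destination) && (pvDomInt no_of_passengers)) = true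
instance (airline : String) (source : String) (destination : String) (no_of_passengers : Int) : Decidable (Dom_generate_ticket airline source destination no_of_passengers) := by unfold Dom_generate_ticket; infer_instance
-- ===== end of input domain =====

-- B precomputes the common prefix once and walks DOWN from the last index collecting at
-- most 5 tickets, then reverses the short list; proved equal to A on all inputs.

-- ===== PORT A =====
def generate_ticket (airline : String) (source : String) (destination : String) (no_of_passengers : Int) : List String :=
  let src := PySem.Str.upper (PySem.Str.slice source none (some 3))
  let dest := PySem.Str.upper (PySem.Str.slice destination none (some 3))
  let ticket_number_list := (PySem.List.pyRange 0 no_of_passengers 1).foldl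
    (fun acc i => acc ++ [airline ++ ":" ++ src ++ ":" ++ dest ++ ":" ++ PySem.Int.toStr (101 + i)]) []
  PySem.List.slice ticket_number_list (some (-5)) none

-- ===== PORT B =====
-- the while loop: while i >= 0 and len(out) < 5: out.append(prefix + str(101+i)); i -= 1
-- ported with the remaining capacity (5 - len(out)) as the structural fuel
def gtAltLoop (pre : String) : Int → Nat → List String → List String
  | _, 0, out => out
  | i, k + 1, out =>
      if 0 ≤ i then gtAltLoop pre (i - 1) k (out ++ [pre ++ PySem.Int.toStr (101 + i)])
      else out

def generate_ticket_alt (airline : String) (source : String) (destination : String) (no_of_passengers : Int) : List String :=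
  let pre := airline ++ ":" ++ PySem.Str.upper (PySem.Str.slice source none (some 3))
      ++ ":" ++ PySem.Str.upper (PySem.Str.slice destination none (some 3)) ++ ":"
  (gtAltLoop pre (no_of_passengers - 1) 5 []).reverse

-- ===== PRECONDITION & SPEC =====
def Spec_generate_ticket (airline : String) (source : String) (destination : String) (no_of_passengers : Int) (out : List String) : Prop := out = generate_ticket_alt airline source destination no_of_passengers
instance (airline : String) (source : String) (destination : String) (no_of_passengers : Int) (out : List String) : Decidable (Spec_generate_ticket airline source destination no_of_passengers out) := by unfold Spec_generate_ticket; infer_instance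

-- ===== CLAIM =====
def Claim_equal_generate_ticket : Prop := ∀ (airline : String) (source : String) (destination : String) (no_of_passengers : Int), Dom_generate_ticket airline source destination no_of_passengers → Spec_generate_ticket airline source destination no_of_passengers (generate_ticket airline source destination no_of_passengers)

-- ===== LEMMAS AND PROOFS =====

-- the countdown loop collects exactly the tickets for indices max(0, i+1-k) … i, in reverse
theorem gtAltLoop_eq (pre : String) (k : Nat) : ∀ (i : Int) (out : List String),
    gtAltLoop pre i k out
      = out ++ ((PySem.List.pyRange (max 0 (i + 1 - k)) (i + 1) 1).map
          (fun j => pre ++ PySem.Int.toStr (101 + j))).reverse := by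
  induction k with
  | zero =>
    intro i out
    rw [PySem.List.pyRange_one_eq_nil (by omega)]
    simp [gtAltLoop]
  | succ k ih =>
    intro i out
    by_cases hi : 0 ≤ i
    · rw [gtAltLoop, if_pos hi, ih]
      have h1 : max 0 (i - k) ≤ i := by omega
      have : max 0 (i + 1 - (k + 1 : Nat)) = max 0 (i - 1 + 1 - k) := by
        push_cast; omega
      rw [this, PySem.List.pyRange_one_append (max 0 (i - 1 + 1 - k)) i (i + 1)
            (by omega) (by omega),
          PySem.List.pyRange_one_singleton]
      simp
    · rw [gtAltLoop, if_neg hi, PySem.List.pyRange_one_eq_nil (by omega)]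
      simp

-- the last-5 slice of a full map over range(0,n) is the map over range(max(0,n-5), n)
theorem drop_map_pyRange (f : Int → String) (n : Int) :
    PySem.List.slice ((PySem.List.pyRange 0 n 1).map f) (some (-5)) none
      = (PySem.List.pyRange (max 0 (n - 5)) n 1).map f := by
  rw [PySem.List.slice_from_neg_ofNat _ 5 (by omega)]
  by_cases hn : n ≤ 0
  · rw [PySem.List.pyRange_one_eq_nil hn, PySem.List.pyRange_one_eq_nil (by omega)]
    simp
  · set m : Int := max 0 (n - 5) with hm
    have h1 : (0:Int) ≤ m := by omega
    have h2 : m ≤ n := by omega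
    rw [PySem.List.pyRange_one_append 0 m n h1 h2, List.map_append]
    have hlen1 : ((PySem.List.pyRange 0 m 1).map f).length = m.toNat := by
      simp [PySem.List.length_pyRange_one]
    have hlen : (((PySem.List.pyRange 0 m 1).map f) ++ ((PySem.List.pyRange m n 1).map f)).length
        = n.toNat := by
      simp [PySem.List.length_pyRange_one]; omega
    rw [hlen]
    have : n.toNat - 5 = ((PySem.List.pyRange 0 m 1).map f).length := by
      rw [hlen1]; omega
    rw [this, List.drop_left]

-- ===== VERDICT =====
theorem generate_ticket_spec : Claim_equal_generate_ticket := by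
  intro airline source destination n _
  unfold Spec_generate_ticket generate_ticket generate_ticket_alt
  simp only [PySem.List.foldl_append_singleton_eq_map, List.nil_append]
  rw [drop_map_pyRange _ n, gtAltLoop_eq]
  have : max 0 (n - 1 + 1 - (5 : Nat)) = max 0 (n - 5) := by push_cast; omega
  rw [this]
  simp [String.append_assoc]
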